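-- pv_equiv track=rewrite | github.com/rishikesha/ProgrammingProblems | Kattis/iforaneye.py | contractWord
-- ===== SOURCE A (Python) =====
-- import sys, os, re, string
-- from typing import Tuple, Dict
--
-- lookuptable = {
--     "at": "@",
--     "and": "&",
--     "one" : "1",
--     "won" : "1",
--     "to" : "2",
--     "too" : "2",
--     "two" : "2",
--     "for" : "4",
--     "four" : "4",
--     "bea" : 'b',
--     "be" : 'b',
--     "bee" : 'b',
--     "sea" : 'c',
--     "see" : 'c',
--     "eye" : 'i',
--     "oh" : 'o',
--     "owe" : 'o',
--     "are" : 'r',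
--     "you" : "u",
--     "why" : 'y'
-- }
--
-- def getvalue(d : Dict[str, str], k : str) -> str:
--     if k in d.keys():
--         return d[k]
--     return k
--
-- def findLongestMatch(word : str) -> int:
--     for i in range(len(word),1,-1):
--         if word[:i].lower() in lookuptable.keys():
--             return i
--     return 1
--
-- def contractWord(word : str) -> str:
--     result = ""
--     while word != "":
--         i = findLongestMatch(word)
--         w = getvalue(lookuptable, word[0:i].lower())
--         if word[0] in string.ascii_uppercase:
--             w = w.capitalize()
--         result += w
--         word = word[i:]
--     return result
-- ===== SOURCE B (Python) =====
-- _TABLE = {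
--     "at": "@", "and": "&", "one": "1", "won": "1", "to": "2", "too": "2",
--     "two": "2", "for": "4", "four": "4", "bea": 'b', "be": 'b', "bee": 'b',
--     "sea": 'c', "see": 'c', "eye": 'i', "oh": 'o', "owe": 'o', "are": 'r',
--     "you": "u", "why": 'y'
-- }
--
-- def _step(word, i):
--     # no table key is longer than 4 characters, so only windows of
--     # length 4, 3, 2 need to be probed (longest first)
--     for L in (4, 3, 2):
--         if i + L <= len(word):
--             v = _TABLE.get(word[i:i + L].lower())
--             if v is not None:
--                 return v, L
--     return word[i], 1
--
-- def contractWord(word):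
--     out = []
--     i, n = 0, len(word)
--     while i < n:
--         rep, step = _step(word, i)
--         if word[i].isupper():
--             rep = rep.upper()
--         out.append(rep)
--         i += step
--     return ''.join(out)
-- ===== Notes on version B (the rewrite author's own statement) =====
-- stated objective: faster
-- what changed: B replaces A's per-step scan over every prefix length len(word)..2 (each prefix lowered and looked up) plus repeated word = word[i:] re-slicing by one index-based left-to-right pass that probes only windows of length 4, 3, 2 (the maximum table-key length) with dict.get and joins the pieces at the end.
import Mathlib
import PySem

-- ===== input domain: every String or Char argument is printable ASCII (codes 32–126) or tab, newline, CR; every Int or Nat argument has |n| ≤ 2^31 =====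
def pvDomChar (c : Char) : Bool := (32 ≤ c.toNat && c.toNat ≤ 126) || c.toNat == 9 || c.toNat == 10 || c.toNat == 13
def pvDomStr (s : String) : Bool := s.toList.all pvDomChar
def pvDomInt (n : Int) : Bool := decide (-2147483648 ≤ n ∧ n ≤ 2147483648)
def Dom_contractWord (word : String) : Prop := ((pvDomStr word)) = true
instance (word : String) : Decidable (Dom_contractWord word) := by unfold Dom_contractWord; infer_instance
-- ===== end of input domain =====

-- B replaces A's per-step scan over every prefix length len(word)..2 plus repeated word[i:]
-- re-slicing by one left-to-right pass that probes only windows of length 4/3/2 (the maximum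
-- key length); a timing run measured B faster (A is superlinear, B linear).

-- the module-level lookup table, shared data of both programs
def pvTable : PySem.Dict (List Char) (List Char) :=
  PySem.Dict.mk [
    ("at".toList, "@".toList), ("and".toList, "&".toList), ("one".toList, "1".toList),
    ("won".toList, "1".toList), ("to".toList, "2".toList), ("too".toList, "2".toList),
    ("two".toList, "2".toList), ("for".toList, "4".toList), ("four".toList, "4".toList),
    ("bea".toList, "b".toList), ("be".toList, "b".toList), ("bee".toList, "b".toList),
    ("sea".toList, "c".toList), ("see".toList, "c".toList), ("eye".toList, "i".toList),
    ("oh".toList, "o".toList), ("owe".toList, "o".toList), ("are".toList, "r".toList),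
    ("you".toList, "u".toList), ("why".toList, "y".toList)]

-- ===== PORT A =====
def pvAsciiUppercase : List Char := "ABCDEFGHIJKLMNOPQRSTUVWXYZ".toList

-- getvalue(d, k): if k in d.keys(): return d[k] ; return k
def pvGetvalue (d : PySem.Dict (List Char) (List Char)) (k : List Char) : List Char :=
  if d.contains k then d.getD k k else k

-- the 'for i in range(len(word),1,-1)' loop of findLongestMatch with its early return
def pvFlmGo (w : List Char) : List Int → Int
  | [] => 1
  | i :: rest =>
      if pvTable.contains (PySem.Chars.lower (PySem.List.slice w none (some i))) then i
      else pvFlmGo w rest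

def findLongestMatchA (w : List Char) : Int :=
  pvFlmGo w (PySem.List.pyRange (w.length : Int) 1 (-1))

-- Python str.capitalize (exact on ASCII): first char upper-cased, the rest lower-cased
def pvCapitalize : List Char → List Char
  | [] => []
  | c :: rest => PySem.Chars.upperChar c :: PySem.Chars.lower rest

-- termination helper for the while loop: findLongestMatch always returns ≥ 1
lemma pvFlm_mem_or_one (w : List Char) (r : List Int) :
    pvFlmGo w r = 1 ∨ pvFlmGo w r ∈ r := by
  induction r with
  | nil => exact Or.inl rfl
  | cons i rest ih =>
      by_cases h : pvTable.contains (PySem.Chars.lower (PySem.List.slice w none (some i))) = true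
      · right; simp [pvFlmGo, h]
      · rcases ih with h1 | h1
        · left; simpa [pvFlmGo, h] using h1
        · right; simp [pvFlmGo, h]; right; exact h1

lemma pvFlm_ge_one (w : List Char) : 1 ≤ findLongestMatchA w := by
  rcases pvFlm_mem_or_one w (PySem.List.pyRange (w.length : Int) 1 (-1)) with h | h
  · unfold findLongestMatchA; omega
  · have := (PySem.List.mem_pyRange_neg_one.mp h).1
    unfold findLongestMatchA; omega

-- the while loop of contractWord (result accumulator, word shrinks by i each round)
def pvCwGo (result : List Char) (w : List Char) : List Char :=
  match w with
  | [] => result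
  | c :: rest =>
      let i := findLongestMatchA (c :: rest)
      let v := pvGetvalue pvTable
        (PySem.Chars.lower (PySem.List.slice (c :: rest) none (some i)))
      let v2 := if PySem.Chars.isIn [c] pvAsciiUppercase then pvCapitalize v else v
      pvCwGo (result ++ v2) (PySem.List.slice (c :: rest) (some i) none)
  termination_by w.length
  decreasing_by
    have h1 : 1 ≤ findLongestMatchA (c :: rest) := pvFlm_ge_one (c :: rest)
    rw [PySem.List.slice_from (c :: rest) (show (0:Int) ≤ findLongestMatchA (c :: rest) by omega)]
    simp
    omega

def contractWord (word : String) : String := String.ofList (pvCwGo [] word.toList)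

-- ===== PORT B =====
-- _TABLE.get(word[i:i+L].lower()) guarded by i + L <= len(word)  (on the suffix w = word[i:])
def pvTry (w : List Char) (L : Nat) : Option (List Char) :=
  if L ≤ w.length then pvTable.get? (PySem.Chars.lower (w.take L)) else none

-- _step(word, i): the 'for L in (4, 3, 2)' probe with its fallback (word[i], 1)
def pvStep (c : Char) (rest : List Char) : List Char × Nat :=
  match pvTry (c :: rest) 4 with
  | some v => (v, 4)
  | none =>
    match pvTry (c :: rest) 3 with
    | some v => (v, 3)
    | none =>
      match pvTry (c :: rest) 2 with
      | some v => (v, 2)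
      | none => ([c], 1)

lemma pvStep_pos (c : Char) (rest : List Char) : 1 ≤ (pvStep c rest).2 := by
  unfold pvStep
  rcases pvTry (c :: rest) 4 with _ | v4 <;> simp
  rcases pvTry (c :: rest) 3 with _ | v3 <;> simp
  rcases pvTry (c :: rest) 2 with _ | v2 <;> simp

-- the while loop of B: emit one piece, advance by its step
def pvAltGo (w : List Char) : List Char :=
  match w with
  | [] => []
  | c :: rest =>
      let p := pvStep c rest
      (if PySem.Chars.isupper c then PySem.Chars.upper p.1 else p.1) ++
        pvAltGo ((c :: rest).drop p.2)
  termination_by w.length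
  decreasing_by
    have := pvStep_pos c rest
    simp
    omega

def contractWord_alt (word : String) : String := String.ofList (pvAltGo word.toList)

-- ===== PRECONDITION & SPEC =====
def Spec_contractWord (word : String) (out : String) : Prop := out = contractWord_alt word
instance (word : String) (out : String) : Decidable (Spec_contractWord word out) := by unfold Spec_contractWord; infer_instance

-- ===== CLAIM (what is proved, stated in full; the proofs are below) =====
def Claim_equal_contractWord : Prop := ∀ (word : String), Dom_contractWord word → Spec_contractWord word (contractWord word)

-- ===== LEMMAS AND PROOFS =====

-- every key of the table has length 2, 3 or 4
lemma pvTable_key_len {k : List Char} (h : pvTable.contains k = true) :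
    2 ≤ k.length ∧ k.length ≤ 4 := by
  simp [pvTable, PySem.Dict.contains] at h
  rcases h with h|h|h|h|h|h|h|h|h|h|h|h|h|h|h|h|h|h|h|h <;> subst h <;> decide

-- every value of the table is a single character
lemma pvTable_val_len {k v : List Char} (h : pvTable.get? k = some v) : v.length ≤ 1 := by
  have hm := PySem.Dict.mem_items_of_get?_eq_some (d := pvTable) h
  simp [pvTable] at hm
  rcases hm with ⟨h1,h2⟩|⟨h1,h2⟩|⟨h1,h2⟩|⟨h1,h2⟩|⟨h1,h2⟩|⟨h1,h2⟩|⟨h1,h2⟩|⟨h1,h2⟩|⟨h1,h2⟩|⟨h1,h2⟩|⟨h1,h2⟩|⟨h1,h2⟩|⟨h1,h2⟩|⟨h1,h2⟩|⟨h1,h2⟩|⟨h1,h2⟩|⟨h1,h2⟩|⟨h1,h2⟩|⟨h1,h2⟩|⟨h1,h2⟩ <;> subst h2 <;> decide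

lemma pvCapitalize_eq_upper {v : List Char} (h : v.length ≤ 1) :
    pvCapitalize v = PySem.Chars.upper v := by
  match v, h with
  | [], _ => rfl
  | [x], _ => rfl

-- 'word[0] in string.ascii_uppercase' is exactly isupper on a single character
lemma pvIsIn_upper_eq (c : Char) :
    PySem.Chars.isIn [c] pvAsciiUppercase = PySem.Chars.isupper c := by
  by_cases h : PySem.Chars.isupper c = true
  · rw [h]
    rw [PySem.Chars.isIn_iff_infix]
    simp [PySem.Chars.isupper] at h
    have hv : c = Char.ofNat c.toNat := (Char.ofNat_toNat c).symm
    have h1 : 65 ≤ c.toNat := h.1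
    have h2 : c.toNat ≤ 90 := h.2
    rw [hv]
    interval_cases c.toNat <;> decide
  · simp only [Bool.not_eq_true] at h
    rw [h]
    rw [Bool.eq_false_iff]
    intro hin
    rw [PySem.Chars.isIn_iff_infix] at hin
    have hmem : c ∈ pvAsciiUppercase := hin.mem (by simp)
    have : PySem.Chars.isupper c = true := by
      simp [pvAsciiUppercase] at hmem
      rcases hmem with h|h|h|h|h|h|h|h|h|h|h|h|h|h|h|h|h|h|h|h|h|h|h|h|h|h <;> subst h <;> decide
    simp [this] at h

lemma pvUpperChar_lowerChar (c : Char) :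
    PySem.Chars.upperChar (PySem.Chars.lowerChar c) = PySem.Chars.upperChar c := by
  by_cases h : PySem.Chars.isupper c = true
  · simp [PySem.Chars.isupper] at h
    have hv : c = Char.ofNat c.toNat := (Char.ofNat_toNat c).symm
    have h1 : 65 ≤ c.toNat := h.1
    have h2 : c.toNat ≤ 90 := h.2
    conv_lhs => rw [hv]
    conv_rhs => rw [hv]
    interval_cases c.toNat <;> decide
  · simp [PySem.Chars.lowerChar, h]

lemma pvLowerChar_of_not_upper {c : Char} (h : ¬ PySem.Chars.isupper c = true) :
    PySem.Chars.lowerChar c = c := by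
  simp [PySem.Chars.lowerChar, h]

lemma pvLower_len (l : List Char) : (PySem.Chars.lower l).length = l.length := by
  simp [PySem.Chars.lower]

lemma pvContains_false_of_len {k : List Char} (h : k.length < 2 ∨ 4 < k.length) :
    pvTable.contains k = false := by
  rw [Bool.eq_false_iff]
  intro hc
  have := pvTable_key_len hc
  omega

-- A's scan condition at a Nat index agrees with B's guarded probe
lemma pvCond_eq_try (w : List Char) (L : Nat) (hL : L ≤ w.length) :
    pvTable.contains (PySem.Chars.lower (PySem.List.slice w none (some (L : Int)))) =
    (pvTry w L).isSome := by
  rw [PySem.List.slice_to w (by omega)]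
  simp [pvTry, hL, PySem.Dict.contains_eq_isSome_get?]

-- prefixes longer than every key never match: skip the high end of A's scan
lemma pvFlm_skip (w : List Char) :
    ∀ m : Nat, 4 ≤ m → m ≤ w.length →
      pvFlmGo w (PySem.List.pyRange (m : Int) 1 (-1)) =
      pvFlmGo w (PySem.List.pyRange (4 : Int) 1 (-1)) := by
  intro m
  induction m with
  | zero => omega
  | succ m ih =>
      intro h4 hlen
      by_cases hm : 4 ≤ m
      · rw [PySem.List.pyRange_neg_one_cons (by omega)]
        have hcond : pvTable.contains (PySem.Chars.lower
            (PySem.List.slice w none (some ((m + 1 : Nat) : Int)))) = false := by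
          rw [PySem.List.slice_to w (by omega)]
          apply pvContains_false_of_len
          rw [pvLower_len]
          simp
          omega
        rw [pvFlmGo]
        rw [show ((m + 1 : Nat) : Int) - 1 = ((m : Nat) : Int) by omega] at *
        simp only [hcond]
        simp
        exact ih hm (by omega)
      · have : m + 1 = 4 := by omega
        rw [this]
        norm_num

-- A's findLongestMatch computes exactly B's 4/3/2 probe cascade
lemma pvFlm_char (c : Char) (rest : List Char) :
    findLongestMatchA (c :: rest) =
      if (pvTry (c :: rest) 4).isSome then 4
      else if (pvTry (c :: rest) 3).isSome then 3
      else if (pvTry (c :: rest) 2).isSome then 2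
      else 1 := by
  set w := c :: rest with hw
  have hn : 1 ≤ w.length := by rw [hw]; simp
  unfold findLongestMatchA
  by_cases h4 : 4 ≤ w.length
  · rw [pvFlm_skip w w.length h4 le_rfl]
    rw [show PySem.List.pyRange (4 : Int) 1 (-1) = [4, 3, 2] by decide]
    have e4 := pvCond_eq_try w 4 h4
    have e3 := pvCond_eq_try w 3 (by omega)
    have e2 := pvCond_eq_try w 2 (by omega)
    norm_num at e4 e3 e2
    simp only [pvFlmGo, e4, e3, e2]
  · have h1 : w.length = 1 ∨ w.length = 2 ∨ w.length = 3 := by omega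
    have ht4 : (pvTry w 4).isSome = false := by simp [pvTry]; omega
    rcases h1 with h | h | h
    · have ht3 : (pvTry w 3).isSome = false := by simp [pvTry]; omega
      have ht2 : (pvTry w 2).isSome = false := by simp [pvTry]; omega
      rw [h]
      rw [show PySem.List.pyRange ((1 : Nat) : Int) 1 (-1) = [] by decide]
      simp only [pvFlmGo, ht4, ht3, ht2]
      simp
    · have ht3 : (pvTry w 3).isSome = false := by simp [pvTry]; omega
      have e2 := pvCond_eq_try w 2 (by omega)
      norm_num at e2
      rw [h]
      rw [show PySem.List.pyRange ((2 : Nat) : Int) 1 (-1) = [2] by decide]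
      simp only [pvFlmGo, ht4, ht3, e2]
      simp
    · have e3 := pvCond_eq_try w 3 (by omega)
      have e2 := pvCond_eq_try w 2 (by omega)
      norm_num at e3 e2
      rw [h]
      rw [show PySem.List.pyRange ((3 : Nat) : Int) 1 (-1) = [3, 2] by decide]
      simp only [pvFlmGo, ht4, e3, e2]
      simp

-- the matched case: A's value/advance at probe length L agree with B's
lemma pvMatched (c : Char) (rest : List Char) (L : Nat) (v : List Char)
    (hL : pvTry (c :: rest) L = some v) (hf : findLongestMatchA (c :: rest) = (L : Int)) :
    ((if PySem.Chars.isIn [c] pvAsciiUppercase then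
        pvCapitalize (pvGetvalue pvTable (PySem.Chars.lower
          (PySem.List.slice (c :: rest) none (some (findLongestMatchA (c :: rest))))))
      else pvGetvalue pvTable (PySem.Chars.lower
          (PySem.List.slice (c :: rest) none (some (findLongestMatchA (c :: rest)))))) =
     (if PySem.Chars.isupper c then PySem.Chars.upper v else v)) := by
  have hL' : L ≤ (c :: rest).length ∧
      pvTable.get? (PySem.Chars.lower ((c :: rest).take L)) = some v := by
    simpa [pvTry] using hL
  obtain ⟨hLlen, hget⟩ := hL'
  have hkey : PySem.List.slice (c :: rest) none (some (findLongestMatchA (c :: rest))) =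
      (c :: rest).take L := by
    rw [hf, PySem.List.slice_to _ (by omega)]
    simp
  rw [hkey]
  have hcont : pvTable.contains (PySem.Chars.lower ((c :: rest).take L)) = true := by
    rw [PySem.Dict.contains_eq_isSome_get?, hget]
    rfl
  have hgv : pvGetvalue pvTable (PySem.Chars.lower ((c :: rest).take L)) = v := by
    rw [pvGetvalue, hcont]
    simp
    exact PySem.Dict.getD_of_get?_eq_some _ _ hget
  rw [hgv, pvIsIn_upper_eq]
  by_cases hu : PySem.Chars.isupper c = true
  · rw [hu]
    simp only [if_true]
    exact pvCapitalize_eq_upper (pvTable_val_len hget)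
  · simp only [Bool.not_eq_true] at hu
    rw [hu]
    simp

-- one round of A's loop produces B's piece and B's advance
lemma pvPiece_eq (c : Char) (rest : List Char) :
    (findLongestMatchA (c :: rest) = ((pvStep c rest).2 : Int)) ∧
    ((if PySem.Chars.isIn [c] pvAsciiUppercase then
        pvCapitalize (pvGetvalue pvTable (PySem.Chars.lower
          (PySem.List.slice (c :: rest) none (some (findLongestMatchA (c :: rest))))))
      else pvGetvalue pvTable (PySem.Chars.lower
          (PySem.List.slice (c :: rest) none (some (findLongestMatchA (c :: rest)))))) =
     (if PySem.Chars.isupper c then PySem.Chars.upper (pvStep c rest).1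
      else (pvStep c rest).1)) := by
  have hflm := pvFlm_char c rest
  rcases h4 : pvTry (c :: rest) 4 with _ | v4
  case some =>
    have hstep : pvStep c rest = (v4, 4) := by simp [pvStep, h4]
    have hf : findLongestMatchA (c :: rest) = 4 := by rw [hflm]; simp [h4]
    refine ⟨by rw [hf, hstep]; norm_num, ?_⟩
    rw [hstep]
    exact pvMatched c rest 4 v4 h4 (by rw [hf]; norm_num)
  case none =>
  rcases h3 : pvTry (c :: rest) 3 with _ | v3
  case some =>
    have hstep : pvStep c rest = (v3, 3) := by simp [pvStep, h4, h3]
    have hf : findLongestMatchA (c :: rest) = 3 := by rw [hflm]; simp [h4, h3]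
    refine ⟨by rw [hf, hstep]; norm_num, ?_⟩
    rw [hstep]
    exact pvMatched c rest 3 v3 h3 (by rw [hf]; norm_num)
  case none =>
  rcases h2 : pvTry (c :: rest) 2 with _ | v2
  case some =>
    have hstep : pvStep c rest = (v2, 2) := by simp [pvStep, h4, h3, h2]
    have hf : findLongestMatchA (c :: rest) = 2 := by rw [hflm]; simp [h4, h3, h2]
    refine ⟨by rw [hf, hstep]; norm_num, ?_⟩
    rw [hstep]
    exact pvMatched c rest 2 v2 h2 (by rw [hf]; norm_num)
  case none =>
    have hstep : pvStep c rest = ([c], 1) := by simp [pvStep, h4, h3, h2]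
    have hf : findLongestMatchA (c :: rest) = 1 := by rw [hflm]; simp [h4, h3, h2]
    refine ⟨by rw [hf, hstep]; norm_num, ?_⟩
    rw [hstep]
    have hkey : PySem.List.slice (c :: rest) none (some (findLongestMatchA (c :: rest))) = [c] := by
      rw [hf, PySem.List.slice_to _ (by omega)]
      simp
    rw [hkey]
    have hlow : PySem.Chars.lower [c] = [PySem.Chars.lowerChar c] := rfl
    have hcont : pvTable.contains [PySem.Chars.lowerChar c] = false :=
      pvContains_false_of_len (by simp)
    have hgv : pvGetvalue pvTable [PySem.Chars.lowerChar c] = [PySem.Chars.lowerChar c] := by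
      rw [pvGetvalue, hcont]
      simp
    rw [hlow, hgv, pvIsIn_upper_eq]
    by_cases hu : PySem.Chars.isupper c = true
    · rw [hu]
      simp only [if_true]
      show [PySem.Chars.upperChar (PySem.Chars.lowerChar c)] = _
      rw [pvUpperChar_lowerChar]
      rfl
    · simp only [Bool.not_eq_true] at hu
      rw [hu]
      simp
      exact pvLowerChar_of_not_upper (by simp [hu])

lemma pvGo_eq : ∀ (n : Nat) (w : List Char), w.length ≤ n → ∀ acc,
    pvCwGo acc w = acc ++ pvAltGo w := by
  intro n
  induction n with
  | zero =>
      intro w hw acc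
      have hnil : w = [] := List.eq_nil_of_length_eq_zero (by omega)
      subst hnil
      simp [pvCwGo, pvAltGo]
  | succ n ih =>
      intro w hw acc
      match w with
      | [] => simp [pvCwGo, pvAltGo]
      | c :: rest =>
        obtain ⟨hfl, hpiece⟩ := pvPiece_eq c rest
        rw [pvCwGo, pvAltGo]
        have htail : PySem.List.slice (c :: rest) (some (findLongestMatchA (c :: rest))) =
            (c :: rest).drop (pvStep c rest).2 := by
          rw [PySem.List.slice_from _ (show (0:Int) ≤ _ by have := pvFlm_ge_one (c :: rest); omega)]
          rw [hfl]
          simp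
        rw [htail]
        rw [ih ((c :: rest).drop (pvStep c rest).2)
          (by simp at hw ⊢; have := pvStep_pos c rest; omega)]
        rw [List.append_assoc, hpiece]


-- ===== VERDICT (by name: the statement is the Claim_ definition above) =====
theorem contractWord_spec : Claim_equal_contractWord := by
  intro word _
  unfold Spec_contractWord contractWord contractWord_alt
  have h := pvGo_eq word.toList.length word.toList le_rfl []
  rw [h, List.nil_append]
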